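-- pv_equiv track=rewrite | github.com/ziutus/ai_assistant_lenie_server | backend/library/lenie_markdown.py | md_square_brackets_in_one_line
-- ===== SOURCE A (Python) =====
-- def md_square_brackets_in_one_line(text):
--     is_in_brackets = False
--     text_new = ""
--     level = 0
--
--     for i, char in enumerate(text):
--         if char == '[':
--             is_in_brackets = True
--             text_new += char
--             level += 1
--             continue
--         elif char == ']':
--             text_new += char
--             level -= 1
--             if level == 0:
--                 is_in_brackets = False
--             continue
--         elif char == "\n" and is_in_brackets and level > 0:
--             text_new += " "
--             continue
--         else:
--             text_new += char
--
--     return text_new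
-- ===== SOURCE B (Python) =====
-- def md_square_brackets_in_one_line(text):
--     # Line-based: split on newlines, then re-join the lines, using a space
--     # instead of '\n' at each boundary whose bracket balance so far is positive.
--     lines = text.split('\n')
--     out = [lines[0]]
--     depth = 0
--     for line, nxt in zip(lines, lines[1:]):
--         depth += line.count('[') - line.count(']')
--         out.append(' ' if depth > 0 else '\n')
--         out.append(nxt)
--     return ''.join(out)
-- ===== Notes on version B (the rewrite author's own statement) =====
-- stated objective: faster
-- what changed: Replaces A's single per-character scan with flag/level state and per-character string concatenation by a line-based algorithm: split the text on newlines, then re-join the lines in one pass, choosing a space instead of the newline at each boundary whose cumulative per-line bracket count ('['s minus ']'s) is positive.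
import Mathlib
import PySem

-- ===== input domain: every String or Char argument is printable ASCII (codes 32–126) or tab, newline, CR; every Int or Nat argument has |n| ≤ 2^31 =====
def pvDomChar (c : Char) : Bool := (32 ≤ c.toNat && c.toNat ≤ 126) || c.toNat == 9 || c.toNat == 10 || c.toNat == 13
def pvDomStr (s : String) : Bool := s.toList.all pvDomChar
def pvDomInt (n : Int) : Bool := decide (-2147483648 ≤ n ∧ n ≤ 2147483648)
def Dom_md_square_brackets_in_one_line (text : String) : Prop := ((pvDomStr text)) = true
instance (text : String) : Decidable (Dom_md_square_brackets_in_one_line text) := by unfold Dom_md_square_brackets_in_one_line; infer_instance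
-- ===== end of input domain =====

-- B replaces A's per-character scan by a line-based split-and-rejoin with
-- per-line bracket counts; same O(n) cost, different decomposition.

-- ===== PORT A =====
-- literal transliteration of A's loop: state (is_in_brackets, text_new, level)
def mdA_loop : List Char → Bool → List Char → Int → List Char
  | [], _, acc, _ => acc
  | c :: rest, flag, acc, level =>
    if c = '[' then
      mdA_loop rest true (acc ++ [c]) (level + 1)
    else if c = ']' then
      mdA_loop rest (if level - 1 = 0 then false else flag) (acc ++ [c]) (level - 1)
    else if c = '\n' && flag && decide (0 < level) then
      mdA_loop rest flag (acc ++ [' ']) level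
    else
      mdA_loop rest flag (acc ++ [c]) level

def md_square_brackets_in_one_line (text : String) : String :=
  String.mk (mdA_loop text.toList false [] 0)

-- ===== PORT B =====
-- Python's text.split('\n'), ported by hand (exact: split on every '\n',
-- result list always nonempty); returned as (first line, remaining lines).

def mdB_split : List Char → List Char × List (List Char)
  | [] => ([], [])
  | c :: rest =>
      let (h, t) := mdB_split rest
      if c = '\n' then ([], h :: t) else (c :: h, t)

-- the zip(lines, lines[1:]) loop: for each boundary, update depth by the
-- current line's bracket counts, emit the separator, then the next line
def mdB_loop : List Char → List (List Char) → Int → List Char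
  | _, [], _ => []
  | line, nxt :: rest, depth =>
      let d := depth + (line.count '[' : Int) - (line.count ']' : Int)
      (if 0 < d then ' ' else '\n') :: (nxt ++ mdB_loop nxt rest d)

def md_square_brackets_in_one_line_alt (text : String) : String :=
  let (l0, ls) := mdB_split text.toList
  String.mk (l0 ++ mdB_loop l0 ls 0)

-- ===== PRECONDITION & SPEC =====
def Spec_md_square_brackets_in_one_line (text : String) (out : String) : Prop := out = md_square_brackets_in_one_line_alt text
instance (text : String) (out : String) : Decidable (Spec_md_square_brackets_in_one_line text out) := by unfold Spec_md_square_brackets_in_one_line; infer_instance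

-- ===== CLAIM (what is proved, stated in full; the proofs are below) =====
def Claim_equal_md_square_brackets_in_one_line : Prop := ∀ (text : String), Dom_md_square_brackets_in_one_line text → Spec_md_square_brackets_in_one_line text (md_square_brackets_in_one_line text)

-- ===== LEMMAS AND PROOFS =====

-- Reference form both sides are reduced to: each character emitted with the
-- prefix bracket depth in effect, newlines at positive depth become spaces.
def mdDelta (c : Char) : Int := if c = '[' then 1 else if c = ']' then -1 else 0

def mdEmit : List Char → Int → List Char
  | [], _ => []
  | c :: rest, d =>
      (if c = '\n' ∧ 0 < d then ' ' else c) :: mdEmit rest (d + mdDelta c)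

-- A's flag is true whenever its level is positive; under that invariant the
-- interleaved scan produces exactly the reference emission.
theorem mdA_loop_eq_emit (l : List Char) :
    ∀ (flag : Bool) (acc : List Char) (level : Int), (0 < level → flag = true) →
      mdA_loop l flag acc level = acc ++ mdEmit l level := by
  induction l with
  | nil => intro flag acc level _; simp [mdA_loop, mdEmit]
  | cons c rest ih =>
    intro flag acc level hinv
    simp only [mdA_loop, mdEmit]
    by_cases hob : c = '['
    · rw [if_pos hob, ih true (acc ++ [c]) (level + 1) (fun _ => rfl)]
      simp [mdDelta, hob]
    · rw [if_neg hob]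
      by_cases hcb : c = ']'
      · rw [if_pos hcb]
        rw [ih _ (acc ++ [c]) (level - 1) ?_]
        · simp only [List.append_assoc, List.singleton_append]
          congr 2
          · simp [hcb]
          · congr 1; simp [mdDelta, hcb]; ring
        · intro hpos
          rw [if_neg (by omega : ¬ (level - 1 = 0))]
          exact hinv (by omega)
      · rw [if_neg hcb]
        by_cases hcond : (c = '\n' && flag && decide (0 < level)) = true
        · rw [if_pos hcond]
          obtain ⟨⟨hnl, -⟩, hpos⟩ := by simpa using hcond
          rw [ih flag (acc ++ [' ']) level hinv]
          simp [mdDelta, hnl, hpos]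
        · rw [if_neg hcond]
          rw [ih flag (acc ++ [c]) level hinv]
          have hne : ¬ (c = '\n' ∧ 0 < level) := by
            rintro ⟨hnl, hpos⟩; exact hcond (by simp [hnl, hinv hpos, hpos])
          simp [mdDelta, hne, hob, hcb]

-- mdB_loop only uses its current line through the running balance it adds
theorem mdB_loop_shift (rest : List (List Char)) (l1 l2 : List Char) (d1 d2 : Int)
    (h : d1 + (l1.count '[' : Int) - (l1.count ']' : Int)
       = d2 + (l2.count '[' : Int) - (l2.count ']' : Int)) :
    mdB_loop l1 rest d1 = mdB_loop l2 rest d2 := by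
  cases rest with
  | nil => rfl
  | cons nxt r => simp only [mdB_loop]; rw [h]

-- the reference emission equals B's split-then-rejoin
theorem mdEmit_eq_split (cs : List Char) :
    ∀ (d : Int), mdEmit cs d = (mdB_split cs).1 ++ mdB_loop (mdB_split cs).1 (mdB_split cs).2 d := by
  induction cs with
  | nil => intro d; simp [mdEmit, mdB_split, mdB_loop]
  | cons c rest ih =>
    intro d
    by_cases hnl : c = '\n'
    · subst hnl
      have hδ : mdDelta '\n' = 0 := by decide
      simp only [mdEmit, mdB_split, hδ, add_zero, ih d]
      simp [mdB_loop]
    · simp only [mdEmit, mdB_split, if_neg hnl]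
      have hd : d + (((c :: (mdB_split rest).1).count '[' : Int))
              - (((c :: (mdB_split rest).1).count ']' : Int))
          = (d + mdDelta c) + (((mdB_split rest).1.count '[' : Int))
              - (((mdB_split rest).1.count ']' : Int)) := by
        simp only [List.count_cons, mdDelta, beq_iff_eq]
        split_ifs <;> push_cast
        all_goals try ring
        all_goals (subst_vars; simp_all)
      have hne : ¬ (c = '\n' ∧ 0 < d) := fun h => hnl h.1
      rw [if_neg hne, ih (d + mdDelta c),
          mdB_loop_shift (mdB_split rest).2 (c :: (mdB_split rest).1) (mdB_split rest).1 d (d + mdDelta c) hd]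
      simp

-- ===== VERDICT (by name: the statement is the Claim_ definition above) =====
theorem md_square_brackets_in_one_line_spec : Claim_equal_md_square_brackets_in_one_line := by
  intro text _
  unfold Spec_md_square_brackets_in_one_line md_square_brackets_in_one_line md_square_brackets_in_one_line_alt
  rw [mdA_loop_eq_emit text.toList false [] 0 (by omega), mdEmit_eq_split text.toList 0]
  simp
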